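-- pv_equiv track=rewrite | github.com/Schoa/Python-Lab-Section | Lab 6/Lab6_P5.py | analyze_words
-- ===== SOURCE A (Python) =====
-- def analyze_words(words):
--     result = []
--
--     for index, word in enumerate(words):
--         # Create a list to hold character counts (assuming only lowercase letters)
--         frequency = [0] * 26  # For 'a' to 'z'
--
--         # Count character frequencies
--         for char in word:
--             if 'a' <= char <= 'z':  # Only count lowercase letters
--                 frequency[ord(char) - ord('a')] += 1
--
--         # Create a sorted list of "character: count" strings
--         frequency_list = [f"{chr(i + ord('a'))}: {frequency[i]}" for i in range(26) if frequency[i] > 0]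
--
--         # Format the output string with the word index
--         result_string = f"{index} - {', '.join(frequency_list)}"
--         result.append(result_string)
--
--     return result
-- ===== SOURCE B (Python) =====
-- def analyze_words(words):
--     result = []
--     for index, word in enumerate(words):
--         runs = []  # run-length encoding of the sorted lowercase letters
--         for c in sorted(ch for ch in word if 'a' <= ch <= 'z'):
--             if runs and runs[-1][0] == c:
--                 runs[-1][1] += 1
--             else:
--                 runs.append([c, 1])
--         body = ", ".join(f"{c}: {n}" for c, n in runs)
--         result.append(f"{index} - {body}")
--     return result
-- ===== Notes on version B (the rewrite author's own statement) =====
-- stated objective: alternative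
-- what changed: Replaces the fixed 26-slot counting array and 26-position formatting scan with sorting each word's lowercase letters and run-length encoding the sorted list in one pass, formatting only the runs actually present.
import Mathlib
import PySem

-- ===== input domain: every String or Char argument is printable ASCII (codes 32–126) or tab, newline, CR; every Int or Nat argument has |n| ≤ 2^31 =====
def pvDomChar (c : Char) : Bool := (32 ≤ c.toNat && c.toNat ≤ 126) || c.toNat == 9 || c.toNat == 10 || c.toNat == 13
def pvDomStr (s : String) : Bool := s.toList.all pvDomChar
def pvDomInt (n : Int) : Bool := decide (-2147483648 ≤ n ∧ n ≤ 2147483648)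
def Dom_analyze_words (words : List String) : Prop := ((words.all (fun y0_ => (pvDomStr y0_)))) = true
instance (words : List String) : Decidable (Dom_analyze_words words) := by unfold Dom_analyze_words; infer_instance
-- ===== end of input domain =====

-- B replaces A's fixed 26-slot counting array and 26-position scan with sort + run-length
-- encoding of each word's lowercase letters (alternative algorithm, similar cost).

-- ===== PORT A =====
def awA_step (freq : List Int) (c : Char) : List Int :=
  if 'a' ≤ c ∧ c ≤ 'z' then
    freq.set (c.toNat - 97) (freq.getD (c.toNat - 97) 0 + 1)
  else freq

def awA_line (index : Int) (word : String) : String :=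
  let frequency := word.toList.foldl awA_step (List.replicate 26 0)
  let frequency_list := (List.range 26).filterMap (fun i =>
    if frequency.getD i 0 > 0 then
      some (String.ofList [Char.ofNat (i + 97)] ++ ": " ++ PySem.Int.toStr (frequency.getD i 0))
    else none)
  PySem.Int.toStr index ++ " - " ++ PySem.Str.join ", " frequency_list

def analyze_words (words : List String) : List String :=
  (PySem.List.enumerate words 0).map (fun p => awA_line p.1 p.2)

-- ===== PORT B =====
def awB_push (runs : List (Char × Int)) (c : Char) : List (Char × Int) :=
  match runs.getLast? with
  | some (c0, n) => if c0 = c then runs.dropLast ++ [(c0, n + 1)] else runs ++ [(c, 1)]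
  | none => [(c, 1)]

def awB_line (index : Int) (word : String) : String :=
  let letters := PySem.List.sorted (word.toList.filter (fun c => decide ('a' ≤ c ∧ c ≤ 'z'))) (fun x => x) false
  let runs := letters.foldl awB_push []
  let body := PySem.Str.join ", " (runs.map (fun p => String.ofList [p.1] ++ ": " ++ PySem.Int.toStr p.2))
  PySem.Int.toStr index ++ " - " ++ body

def analyze_words_alt (words : List String) : List String :=
  (PySem.List.enumerate words 0).map (fun p => awB_line p.1 p.2)

-- ===== PRECONDITION & SPEC =====
def Spec_analyze_words (words : List String) (out : List String) : Prop := out = analyze_words_alt words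
instance (words : List String) (out : List String) : Decidable (Spec_analyze_words words out) := by unfold Spec_analyze_words; infer_instance

-- ===== CLAIM (what is proved, stated in full; the proofs are below) =====
def Claim_equal_analyze_words : Prop := ∀ (words : List String), Dom_analyze_words words → Spec_analyze_words words (analyze_words words)

-- ===== LEMMAS AND PROOFS =====

-- abbreviations used only by the proofs
def awCh (i : Nat) : Char := Char.ofNat (i + 97)
def awLow (w : List Char) : List Char := w.filter (fun c => decide ('a' ≤ c ∧ c ≤ 'z'))
def awCnt (i : Nat) (w : List Char) : Nat := (awLow w).count (awCh i)
def awF (w : List Char) (i : Nat) : Option (Char × Int) :=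
  if 0 < awCnt i w then some (awCh i, (awCnt i w : Int)) else none
def awCanon (w : List Char) : List Char :=
  (List.range 26).flatMap (fun i => List.replicate (awCnt i w) (awCh i))

theorem aw_toNat_awCh (i : Nat) (h : i < 26) : (awCh i).toNat = i + 97 := by
  unfold awCh Char.ofNat
  rw [dif_pos (by constructor <;> omega)]
  simp [Char.ofNatAux, Char.toNat, UInt32.toNat_ofNatLT]
  all_goals omega

theorem aw_char_eq_iff (a b : Char) : a = b ↔ a.toNat = b.toNat := by
  constructor
  · intro h; rw [h]
  · intro h; exact Char.ext (UInt32.toNat_inj.mp h)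

theorem aw_low_iff (c : Char) : ('a' ≤ c ∧ c ≤ 'z') ↔ (97 ≤ c.toNat ∧ c.toNat ≤ 122) := by
  rw [Char.le_def, Char.le_def]
  exact Iff.rfl

theorem aw_awCh_low (i : Nat) (h : i < 26) : 'a' ≤ awCh i ∧ awCh i ≤ 'z' := by
  rw [aw_low_iff, aw_toNat_awCh i h]
  omega

theorem aw_awCh_inj {i j : Nat} (hi : i < 26) (hj : j < 26) (h : awCh i = awCh j) : i = j := by
  rw [aw_char_eq_iff, aw_toNat_awCh i hi, aw_toNat_awCh j hj] at h
  omega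

theorem aw_awCh_of_low {c : Char} (h : 'a' ≤ c ∧ c ≤ 'z') :
    c.toNat - 97 < 26 ∧ awCh (c.toNat - 97) = c := by
  rw [aw_low_iff] at h
  refine ⟨by omega, ?_⟩
  rw [aw_char_eq_iff, aw_toNat_awCh _ (by omega)]
  omega

-- ===== A-side: the 26-slot array holds the lowercase counts =====

theorem aw_low_cons (c : Char) (w : List Char) :
    awLow (c :: w) = if 'a' ≤ c ∧ c ≤ 'z' then c :: awLow w else awLow w := by
  unfold awLow
  rw [List.filter_cons]
  by_cases h : 'a' ≤ c ∧ c ≤ 'z' <;> simp [h]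

theorem aw_getD_set_self (l : List Int) (k : Nat) (v : Int) (h : k < l.length) :
    (l.set k v).getD k 0 = v := by
  simp [List.getD_eq_getElem?_getD, List.getElem?_set, h]

theorem aw_getD_set_ne (l : List Int) (k j : Nat) (v : Int) (h : k ≠ j) :
    (l.set k v).getD j 0 = l.getD j 0 := by
  simp [List.getD_eq_getElem?_getD, List.getElem?_set, h]

theorem aw_A1 (w : List Char) : ∀ (freq : List Int), freq.length = 26 → ∀ i, i < 26 →
    (w.foldl awA_step freq).getD i 0 = freq.getD i 0 + (awCnt i w : Int) := by
  induction w with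
  | nil =>
    intro freq _ i _
    simp [awCnt, awLow]
  | cons c w ih =>
    intro freq hlen i hi
    rw [List.foldl_cons]
    have hstep : (awA_step freq c).length = 26 := by
      unfold awA_step; split <;> simp [hlen]
    rw [ih _ hstep i hi]
    have hcnt : awCnt i (c :: w)
        = awCnt i w + (if c = awCh i then 1 else 0) := by
      unfold awCnt
      rw [aw_low_cons]
      by_cases h1 : 'a' ≤ c ∧ c ≤ 'z'
      · rw [if_pos h1, List.count_cons]
        by_cases h2 : c = awCh i <;> simp [h2]
      · have hcne : c ≠ awCh i := fun hc => h1 (hc ▸ aw_awCh_low i hi)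
        rw [if_neg h1, if_neg hcne]
        simp
    unfold awA_step
    split_ifs with hlow
    · obtain ⟨hk, hck⟩ := aw_awCh_of_low hlow
      by_cases hki : c.toNat - 97 = i
      · have hceq : c = awCh i := by rw [← hki]; exact hck.symm
        rw [hcnt, if_pos hceq, hki, aw_getD_set_self freq i _ (by omega)]
        push_cast
        ring
      · have hcne : c ≠ awCh i := by
          intro hc
          exact hki (aw_awCh_inj hk hi (by rw [hck, hc]))
        rw [hcnt, if_neg hcne, aw_getD_set_ne freq _ i _ hki]
        simp
    · have hcne : c ≠ awCh i := by
        intro hc; exact hlow (hc ▸ aw_awCh_low i hi)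
      rw [hcnt, if_neg hcne]
      simp

-- ===== B-side: sorted lowercase letters are the canonical block list =====

theorem aw_count_canon_low (w : List Char) {a : Char} (ha : 'a' ≤ a ∧ a ≤ 'z') :
    ∀ (is : List Nat), (∀ i ∈ is, i < 26) → is.Nodup →
    (is.flatMap (fun i => List.replicate (awCnt i w) (awCh i))).count a
      = if a.toNat - 97 ∈ is then awCnt (a.toNat - 97) w else 0 := by
  obtain ⟨hj, hcj⟩ := aw_awCh_of_low ha
  intro is
  induction is with
  | nil => intro _ _; simp
  | cons i is ih =>
    intro h26 hnd
    rw [List.flatMap_cons, List.count_append, List.count_replicate,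
        ih (fun x hx => h26 x (List.mem_cons_of_mem _ hx)) hnd.of_cons]
    by_cases hij : i = a.toNat - 97
    · have : (awCh i == a) = true := by
        rw [beq_iff_eq, hij, hcj]
      rw [if_pos this, hij]
      have hnotin : a.toNat - 97 ∉ is := by
        rw [← hij]; exact (List.nodup_cons.mp hnd).1
      simp [hnotin]
    · have : ¬ (awCh i == a) = true := by
        rw [beq_iff_eq]
        intro hc
        exact hij (aw_awCh_inj (h26 i (List.mem_cons_self)) hj (by rw [hc, hcj]))
      rw [if_neg this]
      simp [List.mem_cons, Ne.symm hij]

theorem aw_canon_perm (w : List Char) : (awCanon w).Perm (awLow w) := by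
  rw [List.perm_iff_count]
  intro a
  by_cases ha : 'a' ≤ a ∧ a ≤ 'z'
  · unfold awCanon
    rw [aw_count_canon_low w ha (List.range 26) (fun i hi => List.mem_range.mp hi) List.nodup_range]
    obtain ⟨hj, hcj⟩ := aw_awCh_of_low ha
    rw [if_pos (List.mem_range.mpr hj)]
    unfold awCnt
    rw [hcj]
  · have h1 : a ∉ awCanon w := by
      intro hm
      unfold awCanon at hm
      obtain ⟨i, hi, hmem⟩ := List.mem_flatMap.mp hm
      rw [List.eq_of_mem_replicate hmem] at ha
      exact ha (aw_awCh_low i (List.mem_range.mp hi))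
    have h2 : a ∉ awLow w := by
      intro hm
      unfold awLow at hm
      have := List.of_mem_filter hm
      simp at this
      exact ha this
    rw [List.count_eq_zero.mpr h1, List.count_eq_zero.mpr h2]

theorem aw_canon_pairwise (w : List Char) : (awCanon w).Pairwise (· ≤ ·) := by
  have key : ∀ (is : List Nat), (∀ i ∈ is, i < 26) → is.Pairwise (· < ·) →
      (is.flatMap (fun i => List.replicate (awCnt i w) (awCh i))).Pairwise (· ≤ ·) := by
    intro is
    induction is with
    | nil => intro _ _; simp
    | cons i is ih =>
      intro h26 hpw
      rw [List.flatMap_cons, List.pairwise_append]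
      refine ⟨List.pairwise_replicate.mpr (Or.inr le_rfl), 
        ih (fun x hx => h26 x (List.mem_cons_of_mem _ hx)) hpw.of_cons, ?_⟩
      intro x hx y hy
      rw [List.eq_of_mem_replicate hx]
      obtain ⟨i', hi', hy'⟩ := List.mem_flatMap.mp hy
      rw [List.eq_of_mem_replicate hy']
      have hlt : i < i' := (List.pairwise_cons.mp hpw).1 i' hi'
      rw [Char.le_def, UInt32.le_iff_toNat_le]
      show (awCh i).toNat ≤ (awCh i').toNat
      rw [aw_toNat_awCh i (h26 i List.mem_cons_self),
          aw_toNat_awCh i' (h26 i' (List.mem_cons_of_mem _ hi'))]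
      omega
  exact key (List.range 26) (fun i hi => List.mem_range.mp hi) List.pairwise_lt_range

theorem aw_sorted_eq (w : List Char) :
    PySem.List.sorted (awLow w) (fun x => x) false = awCanon w :=
  PySem.List.sorted_id_eq_of_perm_of_pairwise _ _ (aw_canon_perm w) (aw_canon_pairwise w)

-- ===== B-side: run-length fold over the canonical list =====

theorem aw_push_same (m : Nat) : ∀ (acc : List (Char × Int)) (c : Char) (k : Int),
    (List.replicate m c).foldl awB_push (acc ++ [(c, k)]) = acc ++ [(c, k + m)] := by
  induction m with
  | zero => intro acc c k; simp
  | succ m ih =>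
    intro acc c k
    rw [List.replicate_succ, List.foldl_cons]
    have : awB_push (acc ++ [(c, k)]) c = acc ++ [(c, k + 1)] := by
      unfold awB_push
      rw [List.getLast?_concat]
      simp
    rw [this, ih]
    congr 2
    push_cast
    ring

theorem aw_push_block (n : Nat) (c : Char) (acc : List (Char × Int)) (hn : 0 < n)
    (hlast : ∀ p ∈ acc.getLast?, p.1 ≠ c) :
    (List.replicate n c).foldl awB_push acc = acc ++ [(c, (n : Int))] := by
  obtain ⟨m, rfl⟩ : ∃ m, n = m + 1 := ⟨n - 1, by omega⟩
  rw [List.replicate_succ, List.foldl_cons]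
  have hstep : awB_push acc c = acc ++ [(c, 1)] := by
    unfold awB_push
    cases hq : acc.getLast? with
    | none => rw [List.getLast?_eq_none_iff.mp hq]; rfl
    | some p =>
      obtain ⟨c0, k⟩ := p
      have : c0 ≠ c := hlast (c0, k) (by rw [hq]; rfl)
      simp [hq, this]
  rw [hstep, aw_push_same]
  congr 2
  push_cast
  ring

theorem aw_fold_canon (w : List Char) : ∀ (is : List Nat), is.Pairwise (· < ·) → (∀ i ∈ is, i < 26) →
    ∀ acc : List (Char × Int), (∀ p ∈ acc.getLast?, ∀ i ∈ is, p.1 ≠ awCh i) →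
    (is.flatMap (fun i => List.replicate (awCnt i w) (awCh i))).foldl awB_push acc
      = acc ++ is.filterMap (awF w) := by
  intro is
  induction is with
  | nil => intro _ _ acc _; simp
  | cons i is ih =>
    intro hpw h26 acc hacc
    rw [List.flatMap_cons, List.foldl_append, List.filterMap_cons]
    by_cases hpos : 0 < awCnt i w
    · rw [aw_push_block _ _ _ hpos (fun p hp => hacc p hp i List.mem_cons_self)]
      rw [ih hpw.of_cons (fun x hx => h26 x (List.mem_cons_of_mem _ hx)) _ ?_]
      · unfold awF
        rw [if_pos hpos, List.append_assoc]
        rfl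
      · intro p hp i' hi'
        rw [List.getLast?_concat] at hp
        cases hp
        intro hc
        have hlt : i < i' := (List.pairwise_cons.mp hpw).1 i' hi'
        exact absurd (aw_awCh_inj (h26 i List.mem_cons_self)
          (h26 i' (List.mem_cons_of_mem _ hi')) hc) (by omega)
    · have h0 : awCnt i w = 0 := by omega
      rw [h0, List.replicate_zero, List.foldl_nil]
      unfold awF
      rw [if_neg hpos]
      exact ih hpw.of_cons (fun x hx => h26 x (List.mem_cons_of_mem _ hx)) acc
        (fun p hp i' hi' => hacc p hp i' (List.mem_cons_of_mem _ hi'))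

theorem aw_runs_eq (w : List Char) :
    (awCanon w).foldl awB_push [] = (List.range 26).filterMap (awF w) := by
  unfold awCanon
  rw [aw_fold_canon w (List.range 26) List.pairwise_lt_range
      (fun i hi => List.mem_range.mp hi) [] (by intro p hp; cases hp)]
  rfl

-- ===== the per-word lines agree =====

theorem aw_line_eq (i : Int) (w : String) : awA_line i w = awB_line i w := by
  unfold awA_line awB_line
  dsimp only
  have hlow : w.toList.filter (fun c => decide ('a' ≤ c ∧ c ≤ 'z')) = awLow w.toList := rfl
  rw [hlow, aw_sorted_eq, aw_runs_eq, List.map_filterMap]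
  congr 1
  congr 1
  apply List.filterMap_congr
  intro j hj
  have hj26 : j < 26 := List.mem_range.mp hj
  have hF : (w.toList.foldl awA_step (List.replicate 26 0)).getD j 0 = (awCnt j w.toList : Int) := by
    rw [aw_A1 w.toList (List.replicate 26 0) (by simp) j hj26]
    rw [List.getD_eq_getElem?_getD, List.getElem?_replicate, if_pos hj26]
    simp
  rw [hF]
  unfold awF
  by_cases hpos : 0 < awCnt j w.toList
  · rw [if_pos (by exact_mod_cast hpos), if_pos hpos]
    rfl
  · rw [if_neg (by exact_mod_cast hpos), if_neg hpos]
    rfl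

-- ===== VERDICT (by name: the statement is the Claim_ definition above) =====
theorem analyze_words_spec : Claim_equal_analyze_words := by
  intro words _
  unfold Spec_analyze_words analyze_words analyze_words_alt
  exact List.map_congr_left (fun p _ => aw_line_eq p.1 p.2)
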